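-- pv_equiv track=rewrite | github.com/Senopiece/bottleneck_transmission | src/impls/shuffled_binary_matrix.py | anf_toggle_family
-- ===== SOURCE A (Python) =====
-- def _bit_for_index(n: int, idx: int) -> int:
--     """Return bitmask (MSB-first) for coordinate ``idx`` in an n-bit vector."""
--     return 1 << (n - 1 - idx)
--
-- def anf_toggle_family(n: int) -> list[tuple[int, int]]:
--     """
--     Enumerate an invertible family of nonlinear maps over GF(2)^n.
--
--     Each element is a pair (target_idx, mask) describing the permutation
--         f(x) = x with coordinate target_idx toggled iff all bits in `mask` are 1.
--
--     Constraints for invertibility: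
--         - mask is non-empty
--         - target_idx bit is NOT included in mask (triangular update, involutive)
--
--     Ordering: target_idx ascending, then mask ascending.
--     """
--     family: list[tuple[int, int]] = []
--     for target in range(n):
--         target_bit = _bit_for_index(n, target)
--         for mask in range(1, 1 << n):
--             if mask & target_bit:
--                 continue  # keep the target outside the condition for invertibility
--             family.append((target, mask))
--     return family
-- ===== SOURCE B (Python) =====
-- def anf_toggle_family(n: int) -> list[tuple[int, int]]:
--     """Directly enumerate valid (target, mask) pairs by inserting a 0 bit at the
--     target's position, instead of scanning all 2**n masks and filtering."""
--     if n < 1: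
--         return []
--     family: list[tuple[int, int]] = []
--     half = 1 << (n - 1)
--     for target in range(n):
--         p = n - 1 - target
--         low_mask = (1 << p) - 1
--         for v in range(1, half):
--             family.append((target, ((v >> p) << (p + 1)) | (v & low_mask)))
--     return family
-- ===== Notes on version B (the rewrite author's own statement) =====
-- stated objective: alternative
-- what changed: B enumerates the valid masks directly: per target it loops v over the half-size range and builds each mask by inserting a cleared bit at the target's MSB-first position (low bits kept, high bits shifted up), instead of A's scan over the full mask range with a skip test on the target bit.
import Mathlib
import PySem

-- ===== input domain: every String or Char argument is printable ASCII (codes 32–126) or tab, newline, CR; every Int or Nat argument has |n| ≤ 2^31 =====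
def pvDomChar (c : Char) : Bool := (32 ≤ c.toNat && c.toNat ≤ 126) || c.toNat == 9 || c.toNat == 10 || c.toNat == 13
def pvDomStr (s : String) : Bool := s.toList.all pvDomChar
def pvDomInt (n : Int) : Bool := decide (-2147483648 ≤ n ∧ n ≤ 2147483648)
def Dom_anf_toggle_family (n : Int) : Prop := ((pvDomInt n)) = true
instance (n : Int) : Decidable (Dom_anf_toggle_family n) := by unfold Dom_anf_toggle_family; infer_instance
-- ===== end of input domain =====

-- B enumerates the valid masks directly by inserting a 0 bit at the target's position,
-- instead of A's scan over all 2^n masks with a skip test (alternative decomposition; same values).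

-- ===== PORT A =====
-- 1 << (n - 1 - idx); the shift amount is nonnegative whenever A evaluates it (idx ∈ range(n))
def pv_bit_for_index (n idx : Int) : Int := 1 <<< (n - 1 - idx).toNat

def anf_toggle_family (n : Int) : List (Int × Int) :=
  (PySem.List.pyRange 0 n 1).foldl (fun family target =>
    let target_bit := pv_bit_for_index n target
    (PySem.List.pyRange 1 ((1 : Int) <<< n.toNat) 1).foldl (fun family mask =>
      if PySem.Int.band mask target_bit ≠ 0 then family
      else family ++ [(target, mask)]) family) []

-- ===== PORT B =====
def anf_toggle_family_alt (n : Int) : List (Int × Int) :=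
  if n < 1 then []
  else
    let half : Int := (1 : Int) <<< (n - 1).toNat
    (PySem.List.pyRange 0 n 1).foldl (fun family target =>
      let p : Nat := (n - 1 - target).toNat
      let low_mask : Int := ((1 : Int) <<< p) - 1
      (PySem.List.pyRange 1 half 1).foldl (fun family (v : Int) =>
        family ++ [(target, PySem.Int.bor ((v >>> p) <<< (p + 1)) (PySem.Int.band v low_mask))]) family) []

-- ===== PRECONDITION & SPEC =====
def Spec_anf_toggle_family (n : Int) (out : List (Int × Int)) : Prop := out = anf_toggle_family_alt n
instance (n : Int) (out : List (Int × Int)) : Decidable (Spec_anf_toggle_family n out) := by unfold Spec_anf_toggle_family; infer_instance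

-- ===== CLAIM (what is proved, stated in full; the proofs are below) =====
def Claim_equal_anf_toggle_family : Prop := ∀ (n : Int), Dom_anf_toggle_family n → Spec_anf_toggle_family n (anf_toggle_family n)

-- ===== LEMMAS AND PROOFS =====

-- arithmetic form of B's bit-insertion map
def pvG (p v : Nat) : Nat := v / 2 ^ p * 2 ^ (p + 1) + v % 2 ^ p

-- bit-insertion as shifts/masks equals its arithmetic form
lemma pvG_bits (p v : Nat) : (v >>> p) <<< (p + 1) ||| (v &&& (2 ^ p - 1)) = pvG p v := by
  have h : v % 2 ^ p < 2 ^ (p + 1) :=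
    lt_of_lt_of_le (Nat.mod_lt _ (Nat.two_pow_pos _))
      (Nat.pow_le_pow_right (by norm_num) (Nat.le_succ _))
  rw [Nat.and_two_pow_sub_one_eq_mod, Nat.shiftRight_eq_div_pow,
    ← Nat.shiftLeft_add_eq_or_of_lt h, Nat.shiftLeft_eq, pvG]

-- the skip test of A in arithmetic form
lemma pv_test (p m : Nat) : (decide (m &&& 2 ^ p = 0)) = decide (m / 2 ^ p % 2 = 0) := by
  have hand := Nat.and_two_pow m p
  have ht := Nat.testBit_eq_decide_div_mod_eq (x := m) (i := p)
  have h2 : 0 < 2 ^ p := Nat.two_pow_pos _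
  rcases hb : m.testBit p with _ | _
  · rw [hb] at hand ht
    simp only [Bool.toNat_false, zero_mul] at hand
    rw [hand]
    have hne1 : m / 2 ^ p % 2 ≠ 1 := fun h => by simp [h] at ht
    simp only [decide_eq_decide]
    generalize m / 2 ^ p = t at hne1 ⊢
    simp only [true_iff]
    omega
  · rw [hb] at hand ht
    simp only [Bool.toNat_true, one_mul] at hand
    have h1 : m / 2 ^ p % 2 = 1 := by
      by_contra h
      simp [h] at ht
    rw [hand]
    simp only [decide_eq_decide]
    generalize m / 2 ^ p = t at h1 ⊢
    omega

-- the core bijection, block by block: filtering masks with bit p clear from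
-- [0, a·2^(p+1)) equals mapping the 0-bit insertion over [0, a·2^p)
lemma pv_blocks (p a : Nat) :
    (List.range (a * 2 ^ (p + 1))).filter (fun m => decide (m / 2 ^ p % 2 = 0))
      = (List.range (a * 2 ^ p)).map (pvG p) := by
  induction a with
  | zero => simp
  | succ a ih =>
    have h2 : 0 < 2 ^ p := Nat.two_pow_pos _
    rw [Nat.succ_mul, List.range_add, List.filter_append, ih,
      Nat.succ_mul (n := a) (m := 2 ^ p), List.range_add, List.map_append]
    congr 1
    rw [List.filter_map, List.map_map]
    have hstep : ∀ j ∈ List.range (2 ^ (p + 1)),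
        ((fun m => decide (m / 2 ^ p % 2 = 0)) ∘ (a * 2 ^ (p + 1) + ·)) j
          = decide (j < 2 ^ p) := by
      intro j hj
      have hj' : j < 2 ^ (p + 1) := List.mem_range.mp hj
      have hpow : 2 ^ (p + 1) = 2 ^ p * 2 := by ring
      have hdiv : (a * 2 ^ (p + 1) + j) / 2 ^ p = 2 * a + j / 2 ^ p := by
        rw [hpow, show a * (2 ^ p * 2) + j = j + 2 * a * 2 ^ p by ring,
          Nat.add_mul_div_right _ _ h2]
        ring
      have hj2 : j / 2 ^ p ≤ 1 := by
        rw [Nat.div_le_iff_le_mul_add_pred h2]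
        omega
      have hj4 : j < 2 ^ p ↔ j / 2 ^ p = 0 :=
        (Nat.div_eq_zero_iff_lt h2).symm
      simp only [Function.comp, hdiv, decide_eq_decide]
      rw [hj4]
      generalize j / 2 ^ p = q at hj2 ⊢
      omega
    rw [List.filter_congr hstep]
    have hsplit : (2:Nat) ^ (p + 1) = 2 ^ p + 2 ^ p := by ring
    rw [hsplit, List.range_add, List.filter_append,
      List.filter_eq_self.mpr (by intro j hj; simpa using List.mem_range.mp hj),
      List.filter_map,
      List.filter_eq_nil_iff.mpr (by intro j hj; simp),
      List.map_nil, List.append_nil]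
    apply List.map_congr_left
    intro j hj
    have hj' : j < 2 ^ p := List.mem_range.mp hj
    have h2' : 0 < 2 ^ p := h2
    simp only [Function.comp, pvG]
    have hq : (a * 2 ^ p + j) / 2 ^ p = a := by
      rw [show a * 2 ^ p + j = j + a * 2 ^ p by ring, Nat.add_mul_div_right _ _ h2,
        Nat.div_eq_of_lt hj', Nat.zero_add]
    have hr : (a * 2 ^ p + j) % 2 ^ p = j := by
      rw [show a * 2 ^ p + j = j + a * 2 ^ p by ring, Nat.add_mul_mod_self_right,
        Nat.mod_eq_of_lt hj']
    rw [hq, hr]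
    ring

-- full-range version, specialised to a power-of-two length
lemma pv_full (p nn : Nat) (hp : p < nn) :
    (List.range (2 ^ nn)).filter (fun m => decide (m &&& 2 ^ p = 0))
      = (List.range (2 ^ (nn - 1))).map (pvG p) := by
  have ha : 2 ^ (nn - 1 - p) * 2 ^ (p + 1) = 2 ^ nn := by
    rw [← pow_add]
    congr 1
    omega
  have hb : 2 ^ (nn - 1 - p) * 2 ^ p = 2 ^ (nn - 1) := by
    rw [← pow_add]
    congr 1
    omega
  rw [← ha, ← hb, ← pv_blocks]
  exact List.filter_congr (fun m _ => pv_test p m)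

-- drop the common first element (mask 0 ↔ v = 0) to start both ranges at 1
lemma pv_tail (p nn : Nat) (hp : p < nn) :
    ((List.range (2 ^ nn - 1)).filter (fun k => decide ((k + 1) &&& 2 ^ p = 0))).map (fun k => k + 1)
      = (List.range (2 ^ (nn - 1) - 1)).map (fun k => pvG p (k + 1)) := by
  have h1 : 0 < 2 ^ nn := Nat.two_pow_pos _
  have h2 : 0 < 2 ^ (nn - 1) := Nat.two_pow_pos _
  have hfull := pv_full p nn hp
  rw [show 2 ^ nn = (2 ^ nn - 1) + 1 by omega, List.range_succ_eq_map,
    show 2 ^ (nn - 1) = (2 ^ (nn - 1) - 1) + 1 by omega, List.range_succ_eq_map] at hfull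
  simp only [List.filter_cons, List.map_cons] at hfull
  rw [show (decide ((0 : Nat) &&& 2 ^ p = 0)) = true by simp] at hfull
  simp only [if_true, List.filter_map, List.map_map, pvG] at hfull
  have h0 : (0 : Nat) / 2 ^ p * 2 ^ (p + 1) + 0 % 2 ^ p = 0 := by simp
  rw [h0] at hfull
  have htail := List.tail_eq_of_cons_eq hfull
  simpa [Function.comp, Nat.succ_eq_add_one, pvG] using htail

lemma pv_cast_shl (w k : Nat) : ((w : Int) <<< k) = ((w <<< k : Nat) : Int) := rfl
lemma pv_cast_shr (w k : Nat) : ((w : Int) >>> k) = ((w >>> k : Nat) : Int) := rfl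

lemma pv_innerA (tb t : Int) (l : List Int) (acc : List (Int × Int)) :
    l.foldl (fun fam mask => if PySem.Int.band mask tb ≠ 0 then fam else fam ++ [(t, mask)]) acc
      = acc ++ (l.filter (fun m => decide (PySem.Int.band m tb = 0))).map (fun m => (t, m)) := by
  rw [← PySem.List.foldl_append_ite (p := fun m => PySem.Int.band m tb = 0) (f := fun m => (t, m))]
  apply PySem.List.foldl_congr_mem
  intro acc' x _
  by_cases h : PySem.Int.band x tb = 0 <;> simp [h]

def pvFA (n t : Int) : List (Int × Int) :=
  ((PySem.List.pyRange 1 ((1 : Int) <<< n.toNat) 1).filter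
    (fun m => decide (PySem.Int.band m (pv_bit_for_index n t) = 0))).map (fun m => (t, m))

def pvFB (n t : Int) : List (Int × Int) :=
  (PySem.List.pyRange 1 ((1 : Int) <<< (n - 1).toNat) 1).map
    (fun (v : Int) => (t, PySem.Int.bor ((v >>> (n - 1 - t).toNat) <<< ((n - 1 - t).toNat + 1))
      (PySem.Int.band v ((1 : Int) <<< (n - 1 - t).toNat - 1))))

lemma pv_target (n t : Int) (nn : Nat) (hn : n = (nn : Int)) (h1 : 1 ≤ nn)
    (ht0 : 0 ≤ t) (htn : t < n) :
    ((PySem.List.pyRange 1 ((1 : Int) <<< n.toNat) 1).filter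
        (fun m => decide (PySem.Int.band m (pv_bit_for_index n t) = 0))).map (fun m => (t, m))
      = (PySem.List.pyRange 1 ((1 : Int) <<< (n - 1).toNat) 1).map
          (fun (v : Int) => (t, PySem.Int.bor ((v >>> (n - 1 - t).toNat) <<< ((n - 1 - t).toNat + 1))
            (PySem.Int.band v ((1 : Int) <<< (n - 1 - t).toNat - 1)))) := by
  set p := (n - 1 - t).toNat with hpdef
  have hp : p < nn := by omega
  have h2p : 1 ≤ 2 ^ p := Nat.one_le_two_pow
  have h2nn : 1 ≤ 2 ^ nn := Nat.one_le_two_pow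
  have h2nn1 : 1 ≤ 2 ^ (nn - 1) := Nat.one_le_two_pow
  have hone : ∀ k : Nat, (1 : Int) <<< k = ((2 ^ k : Nat) : Int) := fun k => by
    rw [← Nat.one_shiftLeft]; rfl
  have hbit : pv_bit_for_index n t = ((2 ^ p : Nat) : Int) := by
    rw [pv_bit_for_index, ← hpdef]
    simp [Nat.one_shiftLeft]
  have hX : (1 : Int) <<< n.toNat = ((2 ^ nn : Nat) : Int) := by
    rw [hone, show n.toNat = nn by omega]
  have hY : (1 : Int) <<< (n - 1).toNat = ((2 ^ (nn - 1) : Nat) : Int) := by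
    rw [hone, show (n - 1).toNat = nn - 1 by omega]
  rw [hX, hY, hbit, PySem.List.pyRange_one, PySem.List.pyRange_one]
  rw [show ((((2 ^ nn : Nat) : Int)) - 1).toNat = 2 ^ nn - 1 by omega,
    show ((((2 ^ (nn - 1) : Nat) : Int)) - 1).toNat = 2 ^ (nn - 1) - 1 by omega]
  rw [List.filter_map, List.map_map, List.map_map]
  have hQ : ∀ k ∈ List.range (2 ^ nn - 1),
      ((fun m => decide (PySem.Int.band m ((2 ^ p : Nat) : Int) = 0)) ∘ (fun k : Nat => (1 : Int) + (k : Int))) k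
        = decide ((k + 1) &&& 2 ^ p = 0) := by
    intro k _
    simp only [Function.comp]
    have hcast : (1 : Int) + (k : Int) = ((k + 1 : Nat) : Int) := by push_cast; ring
    simp only [hcast, PySem.Int.band_natCast, Nat.cast_eq_zero]
  rw [List.filter_congr hQ]
  have hmain := congrArg (List.map (fun m : Nat => ((t : Int), (m : Int)))) (pv_tail p nn hp)
  rw [List.map_map, List.map_map] at hmain
  have hL : ((fun m : Nat => ((t : Int), (m : Int))) ∘ fun k => k + 1)
      = ((fun m => ((t:Int), m)) ∘ (fun k : Nat => (1 : Int) + (k : Int))) := by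
    funext k
    simp [Function.comp]
    ring
  rw [hL] at hmain
  rw [hmain]
  apply List.map_congr_left
  intro k _
  simp only [Function.comp]
  rw [show (1 : Int) + (k : Int) = (((k + 1 : Nat)) : Int) by push_cast; ring]
  rw [pv_cast_shr, pv_cast_shl,
    show ((1 : Int) <<< p - 1) = (((2 ^ p - 1 : Nat)) : Int) by
      rw [hone]
      push_cast [h2p]; ring,
    PySem.Int.band_natCast, PySem.Int.bor_natCast, pvG_bits]

-- ===== VERDICT (by name: the statement is the Claim_ definition above) =====
theorem anf_toggle_family_spec : Claim_equal_anf_toggle_family := by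
  intro n _
  unfold Spec_anf_toggle_family
  by_cases hn : n < 1
  · unfold anf_toggle_family anf_toggle_family_alt
    rw [if_pos hn, PySem.List.pyRange_one_eq_nil (by omega : n ≤ 0)]
    rfl
  · have eA : anf_toggle_family n = (PySem.List.pyRange 0 n 1).flatMap (pvFA n) := by
      have e1 : anf_toggle_family n
          = (PySem.List.pyRange 0 n 1).foldl (fun fam t => fam ++ pvFA n t) [] := by
        show (PySem.List.pyRange 0 n 1).foldl (fun family target =>
            (PySem.List.pyRange 1 ((1 : Int) <<< n.toNat) 1).foldl (fun family mask =>
              if PySem.Int.band mask (pv_bit_for_index n target) ≠ 0 then family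
              else family ++ [(target, mask)]) family) [] = _
        apply PySem.List.foldl_congr_mem
        intro acc x _
        exact pv_innerA (pv_bit_for_index n x) x _ acc
      rw [e1, PySem.List.foldl_append_eq_flatMap, List.nil_append]
    have eB : anf_toggle_family_alt n = (PySem.List.pyRange 0 n 1).flatMap (pvFB n) := by
      have e1 : anf_toggle_family_alt n
          = (PySem.List.pyRange 0 n 1).foldl (fun fam t => fam ++ pvFB n t) [] := by
        unfold anf_toggle_family_alt
        rw [if_neg hn]
        show (PySem.List.pyRange 0 n 1).foldl (fun family target =>
            (PySem.List.pyRange 1 ((1 : Int) <<< (n - 1).toNat) 1).foldl (fun family (v : Int) =>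
              family ++ [(target, PySem.Int.bor ((v >>> (n - 1 - target).toNat) <<< ((n - 1 - target).toNat + 1))
                (PySem.Int.band v ((1 : Int) <<< (n - 1 - target).toNat - 1)))]) family) [] = _
        apply PySem.List.foldl_congr_mem
        intro acc x _
        exact PySem.List.foldl_append_singleton_eq_map ..
      rw [e1, PySem.List.foldl_append_eq_flatMap, List.nil_append]
    rw [eA, eB]
    apply List.flatMap_congr
    intro t ht
    obtain ⟨nn, hnn⟩ : ∃ nn : Nat, n = (nn : Int) := ⟨n.toNat, by omega⟩
    have hmem := PySem.List.mem_pyRange_one.mp ht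
    exact pv_target n t nn hnn (by omega) hmem.1 hmem.2
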